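-- pv_equiv track=rewrite | github.com/PyEGo/PyEGo | ModuleParser/module_parser.py | filter_unused_pkgs
-- ===== SOURCE A (Python) =====
-- def filter_unused_pkgs(module_dict, first_method):
--     # module_dict: dict():{module1: [pkg1#ver1#mth1, pkg2#ver2#mth2], }
--     # return: filtered_dict: dict():{module1: [pkg1#ver1#mth1, pkg2#ver2#mth2], }
--     filtered_dict = dict()
--     for module in module_dict:
--         pkgver_list = module_dict[module]
--         filtered_dict[module] = pkgver_list
--         methods = [pkgver.split("#")[-1] for pkgver in pkgver_list]
--         if first_method not in methods:
--             continue
--         else: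
--             filtered = [pkgver for pkgver in pkgver_list if pkgver.split("#")[-1] == first_method]
--             filtered_dict[module] = filtered
--     return filtered_dict
-- ===== SOURCE B (Python) =====
-- def filter_unused_pkgs(module_dict, first_method):
--     # Group each module's entries into a per-module index keyed by method,
--     # then answer with a single dictionary lookup (whole list as the default):
--     # no membership probe, no filtering predicate, no emptiness fallback.
--     filtered_dict = dict()
--     for module, pkgver_list in module_dict.items():
--         by_method = dict()
--         for pkgver in pkgver_list:
--             k = pkgver.split("#")[-1]
--             by_method[k] = by_method.get(k, []) + [pkgver]
--         filtered_dict[module] = by_method.get(first_method, pkgver_list)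
--     return filtered_dict
-- ===== Notes on version B (the rewrite author's own statement) =====
-- stated objective: alternative
-- what changed: B builds a per-module index grouping entries by their method and answers with one dictionary lookup (whole list as default), replacing A's methods list, membership probe and filtering comprehension.
import Mathlib
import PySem

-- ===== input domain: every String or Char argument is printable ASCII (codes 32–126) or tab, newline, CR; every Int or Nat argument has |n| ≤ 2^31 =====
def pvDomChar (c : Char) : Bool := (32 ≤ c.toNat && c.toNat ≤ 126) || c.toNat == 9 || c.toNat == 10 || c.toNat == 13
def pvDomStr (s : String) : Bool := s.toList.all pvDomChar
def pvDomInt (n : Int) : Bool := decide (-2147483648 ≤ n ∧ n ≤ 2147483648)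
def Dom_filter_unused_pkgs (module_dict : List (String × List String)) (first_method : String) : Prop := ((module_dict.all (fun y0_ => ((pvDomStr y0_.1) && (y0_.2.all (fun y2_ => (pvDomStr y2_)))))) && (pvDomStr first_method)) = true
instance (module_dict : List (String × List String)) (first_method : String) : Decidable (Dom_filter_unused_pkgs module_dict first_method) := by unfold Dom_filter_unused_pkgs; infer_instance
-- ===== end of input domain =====

-- B replaces A's membership probe + filtering comprehension by a per-module group-by-method
-- index answered with one dictionary lookup; objective: alternative (return value only).


-- ===== PORT A =====
-- pkgver.split("#")[-1]  (split on "#" is never empty, default never used)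
def pvLastMethod (pkgver : String) : String :=
  PySem.List.pyGetD ((PySem.Str.split? pkgver "#").getD []) (-1) ""

def filter_unused_pkgs (module_dict : List (String × List String)) (first_method : String) : List (String × List String) :=
  ((PySem.Dict.mk module_dict).keys.foldl (init := (PySem.Dict.empty : PySem.Dict String (List String)))
    (fun filtered_dict module =>
      let pkgver_list := (PySem.Dict.mk module_dict).getD module []
      let filtered_dict := filtered_dict.insert module pkgver_list
      let methods := pkgver_list.map (fun pkgver => pvLastMethod pkgver)
      if first_method ∉ methods then
        filtered_dict
      else
        filtered_dict.insert module
          (pkgver_list.filter (fun pkgver => pvLastMethod pkgver == first_method)))).items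

-- ===== PORT B =====
-- by_method[k] = by_method.get(k, []) + [pkgver]  is  Dict.modify k [] (· ++ [pkgver])
def filter_unused_pkgs_alt (module_dict : List (String × List String)) (first_method : String) : List (String × List String) :=
  (module_dict.foldl (init := (PySem.Dict.empty : PySem.Dict String (List String)))
    (fun filtered_dict p =>
      let by_method := p.2.foldl (init := (PySem.Dict.empty : PySem.Dict String (List String)))
        (fun bm pkgver => bm.modify (pvLastMethod pkgver) [] (· ++ [pkgver]))
      filtered_dict.insert p.1 (by_method.getD first_method p.2))).items

-- ===== PRECONDITION & SPEC =====
-- Pre_ excludes association lists with duplicate module keys: a Python dict cannot contain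
-- duplicate keys, so such lists are artefacts of the encoding, not inputs of A.
def Pre_filter_unused_pkgs (module_dict : List (String × List String)) (first_method : String) : Prop :=
  (module_dict.map Prod.fst).Nodup
instance (module_dict : List (String × List String)) (first_method : String) : Decidable (Pre_filter_unused_pkgs module_dict first_method) := by unfold Pre_filter_unused_pkgs; infer_instance

def pvWitness_filter_unused_pkgs : (List (String × List String)) × String :=
  ([("m1", ["a#1#pip", "b#2#apt"]), ("m2", ["c#3#apt"])], "pip")

def Spec_filter_unused_pkgs (module_dict : List (String × List String)) (first_method : String) (out : List (String × List String)) : Prop := out = filter_unused_pkgs_alt module_dict first_method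
instance (module_dict : List (String × List String)) (first_method : String) (out : List (String × List String)) : Decidable (Spec_filter_unused_pkgs module_dict first_method out) := by unfold Spec_filter_unused_pkgs; infer_instance

-- ===== CLAIM (what is proved, stated in full; the proofs are below) =====
def Claim_equal_filter_unused_pkgs : Prop := ∀ (module_dict : List (String × List String)) (first_method : String), Dom_filter_unused_pkgs module_dict first_method → Pre_filter_unused_pkgs module_dict first_method → Spec_filter_unused_pkgs module_dict first_method (filter_unused_pkgs module_dict first_method)

-- ===== LEMMAS AND PROOFS =====

-- the grouping loop: the bucket of fm accumulates exactly the entries whose method is fm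
theorem pv_grp_getD (fm : String) : ∀ (l : List String) (bm : PySem.Dict String (List String)),
    (l.foldl (fun bm e => bm.modify (pvLastMethod e) [] (· ++ [e])) bm).getD fm []
      = bm.getD fm [] ++ l.filter (fun e => pvLastMethod e == fm) := by
  intro l
  induction l with
  | nil => intro bm; simp
  | cons e l ih =>
    intro bm
    simp only [List.foldl_cons, List.filter_cons, ih]
    rw [PySem.Dict.getD_modify]
    by_cases h : pvLastMethod e = fm
    · simp [h]
    · simp [Ne.symm h, (by simpa using h : (pvLastMethod e == fm) = false)]

-- the grouping loop contains fm iff some entry has method fm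
theorem pv_grp_contains (fm : String) : ∀ (l : List String) (bm : PySem.Dict String (List String)),
    (l.foldl (fun bm e => bm.modify (pvLastMethod e) [] (· ++ [e])) bm).contains fm
      = (bm.contains fm || l.any (fun e => pvLastMethod e == fm)) := by
  intro l
  induction l with
  | nil => intro bm; simp
  | cons e l ih =>
    intro bm
    simp only [List.foldl_cons, List.any_cons, ih, PySem.Dict.contains_modify]
    by_cases h : pvLastMethod e = fm
    · simp [h]
    · have h1 : (fm == pvLastMethod e) = false := by simp [Ne.symm h]
      have h2 : (pvLastMethod e == fm) = false := by simp [h]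
      simp [h1, h2]

theorem pv_getD_irrel {d : PySem.Dict String (List String)} (h : d.contains fm = true)
    (a b : List String) : d.getD fm a = d.getD fm b := by
  rw [PySem.Dict.contains_eq_isSome_get?] at h
  obtain ⟨v, hv⟩ := Option.isSome_iff_exists.mp h
  rw [PySem.Dict.getD_of_get?_eq_some _ a hv, PySem.Dict.getD_of_get?_eq_some _ b hv]

-- per-module: B's group-then-lookup equals A's membership-test-then-filter
theorem pv_module_eq (fm : String) (l : List String) :
    (l.foldl (fun bm e => bm.modify (pvLastMethod e) [] (· ++ [e]))
        (PySem.Dict.empty : PySem.Dict String (List String))).getD fm l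
      = if fm ∈ l.map (fun e => pvLastMethod e) then l.filter (fun e => pvLastMethod e == fm) else l := by
  by_cases hmem : fm ∈ l.map (fun e => pvLastMethod e)
  · have hany : l.any (fun e => pvLastMethod e == fm) = true := by
      rcases List.mem_map.mp hmem with ⟨x, hx, he⟩
      exact List.any_eq_true.mpr ⟨x, hx, by simpa using he⟩
    have hc : (l.foldl (fun bm e => bm.modify (pvLastMethod e) [] (· ++ [e]))
        (PySem.Dict.empty : PySem.Dict String (List String))).contains fm = true := by
      rw [pv_grp_contains]; simp [hany]
    rw [pv_getD_irrel hc l [], pv_grp_getD]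
    simp only [PySem.Dict.getD_empty, List.nil_append, if_pos hmem]
  · have hany : l.any (fun e => pvLastMethod e == fm) = false := by
      rw [List.any_eq_false]
      intro x hx
      simpa using beq_eq_false_iff_ne.mpr (fun he => hmem (List.mem_map.mpr ⟨x, hx, he⟩))
    have hc : (l.foldl (fun bm e => bm.modify (pvLastMethod e) [] (· ++ [e]))
        (PySem.Dict.empty : PySem.Dict String (List String))).contains fm = false := by
      rw [pv_grp_contains]; simp [hany]
    rw [PySem.Dict.getD_of_not_contains _ l hc]
    simp [hmem]

theorem pv_getD_mk {md : List (String × List String)} (hnd : (md.map Prod.fst).Nodup)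
    {p : String × List String} (hp : p ∈ md) :
    (PySem.Dict.mk md).getD p.1 [] = p.2 := by
  exact PySem.Dict.getD_of_mem_items (d := PySem.Dict.mk md) (by simpa using hp) (by simpa [PySem.Dict.keys] using hnd) []

theorem filter_unused_pkgs_eq (md : List (String × List String)) (fm : String)
    (hnd : (md.map Prod.fst).Nodup) :
    filter_unused_pkgs md fm = filter_unused_pkgs_alt md fm := by
  unfold filter_unused_pkgs filter_unused_pkgs_alt
  congr 1
  have hkeys : (PySem.Dict.mk md).keys = md.map Prod.fst := by
    simp [PySem.Dict.keys]
  rw [hkeys, List.foldl_map]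
  apply PySem.List.foldl_congr_mem
  intro acc p hp
  simp only
  rw [pv_getD_mk hnd hp, pv_module_eq]
  by_cases hmem : fm ∈ p.2.map (fun e => pvLastMethod e)
  · simp [hmem, PySem.Dict.insert_insert_self]
  · simp [hmem]

-- ===== VERDICT (by name: the statement is the Claim_ definition above) =====
theorem filter_unused_pkgs_spec : Claim_equal_filter_unused_pkgs := by
  intro md fm _ hpre
  unfold Spec_filter_unused_pkgs
  exact filter_unused_pkgs_eq md fm hpre
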